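-- pv_equiv track=rewrite | github.com/Boerseth/aoc | python/2016/9.py | there_are_nested_or_unmatched_parens
-- ===== SOURCE A (Python) =====
-- def there_are_nested_or_unmatched_parens(compressed: str) -> bool:
--     i = 0
--     for char in compressed:
--         if char == "(":
--             i += 1
--         if char == ")":
--             i -= 1
--         if i not in [0, 1]:
--             return True
--     return i != 0
-- ===== SOURCE B (Python) =====
-- def there_are_nested_or_unmatched_parens(compressed: str) -> bool:
--     parens = "".join(c for c in compressed if c in "()")
--     return parens != "()" * (len(parens) // 2)
-- ===== Notes on version B (the rewrite author's own statement) =====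
-- stated objective: simpler
-- what changed: Instead of simulating a depth counter with early exits, B extracts the parenthesis subsequence and compares it for equality against the unique flat balanced template of the same length; measured constant-factor speedup (string ops run in C).
import Mathlib
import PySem

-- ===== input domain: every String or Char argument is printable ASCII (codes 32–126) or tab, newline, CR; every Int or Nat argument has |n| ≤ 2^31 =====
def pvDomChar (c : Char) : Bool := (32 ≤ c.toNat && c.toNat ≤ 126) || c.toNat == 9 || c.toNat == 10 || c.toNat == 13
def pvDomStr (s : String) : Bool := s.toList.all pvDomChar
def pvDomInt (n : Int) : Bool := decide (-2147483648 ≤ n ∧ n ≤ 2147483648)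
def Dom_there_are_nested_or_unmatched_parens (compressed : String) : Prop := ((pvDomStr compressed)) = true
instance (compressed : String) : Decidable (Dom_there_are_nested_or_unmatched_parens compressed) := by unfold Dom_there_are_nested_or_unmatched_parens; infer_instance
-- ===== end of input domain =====

-- B replaces A's counter state machine with early exits by extracting the paren subsequence and comparing it to the flat balanced template of the same length (simpler; measured constant-factor faster).


-- ===== PORT A =====
-- loop over characters with integer counter i; early return when i not in [0, 1]
def pvGoA : List Char → Int → Bool
  | [], i => i != 0
  | c :: cs, i =>
    let i := if c = '(' then i + 1 else i
    let i := if c = ')' then i - 1 else i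
    if i == 0 || i == 1 then pvGoA cs i else true

def there_are_nested_or_unmatched_parens (compressed : String) : Bool :=
  pvGoA compressed.toList 0

-- ===== PORT B =====
-- Source B: keep only the parens, compare with the template "()" * (len // 2)
def pvIsParen (c : Char) : Bool := c == '(' || c == ')'

def pvTemplate : Nat → List Char
  | 0 => []
  | n + 1 => '(' :: ')' :: pvTemplate n

def there_are_nested_or_unmatched_parens_alt (compressed : String) : Bool :=
  let parens := compressed.toList.filter pvIsParen
  !(parens == pvTemplate (parens.length / 2))

-- ===== PRECONDITION & SPEC =====
def Spec_there_are_nested_or_unmatched_parens (compressed : String) (out : Bool) : Prop := out = there_are_nested_or_unmatched_parens_alt compressed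
instance (compressed : String) (out : Bool) : Decidable (Spec_there_are_nested_or_unmatched_parens compressed out) := by unfold Spec_there_are_nested_or_unmatched_parens; infer_instance

-- ===== CLAIM (what is proved, stated in full; the proofs are below) =====
def Claim_equal_there_are_nested_or_unmatched_parens : Prop := ∀ (compressed : String), Dom_there_are_nested_or_unmatched_parens compressed → Spec_there_are_nested_or_unmatched_parens compressed (there_are_nested_or_unmatched_parens compressed)

-- ===== LEMMAS AND PROOFS =====
-- A's counter, started in {0,1}, ignores non-paren characters
theorem pvGoA_filter : ∀ (cs : List Char) (i : Int), i = 0 ∨ i = 1 →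
    pvGoA cs i = pvGoA (cs.filter pvIsParen) i := by
  intro cs
  induction cs with
  | nil => intro i _; rfl
  | cons c cs ih =>
    intro i hi
    by_cases h1 : c = '('
    · subst h1
      rcases hi with h | h <;> subst h <;>
        simp [pvGoA, List.filter, pvIsParen, ih 1 (Or.inr rfl)]
    · by_cases h2 : c = ')'
      · subst h2
        rcases hi with h | h <;> subst h <;>
          simp [pvGoA, List.filter, pvIsParen, ih 0 (Or.inl rfl)]
      · have hf : (c == '(' || c == ')') = false := by simp [h1, h2]
        rcases hi with h | h <;> subst h <;>
          simp [pvGoA, List.filter, pvIsParen, h1, h2, hf, ih 0 (Or.inl rfl), ih 1 (Or.inr rfl)]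

-- on a parens-only list, A's run from 0 returns false exactly on the template
theorem pvGoA_template : ∀ (ps : List Char), ps.all pvIsParen →
    pvGoA ps 0 = !(ps == pvTemplate (ps.length / 2))
  | [], _ => by decide
  | [c], h => by
    simp [List.all_cons, pvIsParen] at h
    rcases h with h | h <;> subst h <;> decide
  | c1 :: c2 :: rest, h => by
    simp [List.all_cons, pvIsParen] at h
    obtain ⟨h1, h2, hrest⟩ := h
    have hlen : (rest.length + 1 + 1) / 2 = rest.length / 2 + 1 := by omega
    rcases h1 with h1 | h1 <;> rcases h2 with h2 | h2 <;> subst h1 <;> subst h2 <;>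
      simp only [List.length_cons, hlen]
    · -- "((" : nested
      simp [pvGoA, pvTemplate]
    · -- "()" : strip and recurse
      have := pvGoA_template rest (by simpa [List.all_eq_true, pvIsParen] using hrest)
      simp [pvGoA, pvTemplate, this]
    · -- ")(" : unmatched
      simp [pvGoA, pvTemplate]
    · -- "))" : unmatched
      simp [pvGoA, pvTemplate]

-- ===== VERDICT (by name: the statement is the Claim_ definition above) =====
theorem there_are_nested_or_unmatched_parens_spec : Claim_equal_there_are_nested_or_unmatched_parens := by
  intro compressed _
  unfold Spec_there_are_nested_or_unmatched_parens
  unfold there_are_nested_or_unmatched_parens there_are_nested_or_unmatched_parens_alt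
  rw [pvGoA_filter compressed.toList 0 (Or.inl rfl)]
  exact pvGoA_template _ (by simp [List.all_eq_true])
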